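-- pv_equiv track=rewrite | github.com/iivvoo/ate | ate/tags.py | find_start_block
-- ===== SOURCE A (Python) =====
-- def find_start_block(code):
--     """ find the start of the nearest block: {{ {% or {# """
--     indexes = []
--
--     for start in ('{%', '{{', '{#'):
--         index = code.find(start)
--         if index != -1:
--             indexes.append(index)
--
--     if indexes:
--         return min(indexes)
--     return -1
-- ===== SOURCE B (Python) =====
-- def find_start_block(code):
--     """ find the start of the nearest block: {{ {% or {# """
--     for i in range(len(code) - 1):
--         if code[i] == '{' and code[i + 1] in '%{#':
--             return i
--     return -1
-- ===== Notes on version B (the rewrite author's own statement) =====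
-- stated objective: simpler
-- what changed: B replaces the three separate str.find scans plus list-building and min with one left-to-right sliding-window pass that returns the first index where '{' is followed by '%', '{' or '#'.
import Mathlib
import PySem

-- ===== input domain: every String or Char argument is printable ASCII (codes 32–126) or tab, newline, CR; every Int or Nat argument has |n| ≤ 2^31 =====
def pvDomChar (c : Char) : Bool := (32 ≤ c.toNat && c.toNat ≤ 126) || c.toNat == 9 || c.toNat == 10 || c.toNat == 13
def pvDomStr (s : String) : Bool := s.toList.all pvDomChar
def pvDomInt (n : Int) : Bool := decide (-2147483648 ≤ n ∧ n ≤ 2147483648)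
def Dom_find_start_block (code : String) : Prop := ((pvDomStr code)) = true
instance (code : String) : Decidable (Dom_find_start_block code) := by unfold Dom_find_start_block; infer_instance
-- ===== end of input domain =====

-- B replaces A's three str.find scans + min with one sliding-window pass returning the first index of '{' followed by '%', '{' or '#' (simpler, same result).


-- ===== PORT A =====
def find_start_block (code : String) : Int :=
  let indexes : List Int :=
    [("{%" : String), "{{", "{#"].foldl
      (fun indexes start =>
        let index := PySem.Str.find code start
        if index ≠ -1 then indexes ++ [index] else indexes) []
  if indexes ≠ [] then (PySem.List.min? indexes id).getD (-1) else -1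

-- ===== PORT B =====
-- Source B's loop 'for i in range(len(code)-1): if code[i]=='{' and code[i+1] in '%{#': return i'
-- transcribed as the obvious sliding-window recursion over the characters carrying the index i.
def scanAlt : List Char → Nat → Int
  | c :: d :: rest, i =>
      if c = '{' ∧ (d = '%' ∨ d = '{' ∨ d = '#') then (i : Int)
      else scanAlt (d :: rest) (i + 1)
  | _, _ => -1

def find_start_block_alt (code : String) : Int := scanAlt code.toList 0

-- ===== PRECONDITION & SPEC =====
def Spec_find_start_block (code : String) (out : Int) : Prop := out = find_start_block_alt code
instance (code : String) (out : Int) : Decidable (Spec_find_start_block code out) := by unfold Spec_find_start_block; infer_instance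

-- ===== CLAIM (what is proved, stated in full; the proofs are below) =====
def Claim_equal_find_start_block : Prop := ∀ (code : String), Dom_find_start_block code → Spec_find_start_block code (find_start_block code)

-- ===== LEMMAS AND PROOFS =====

-- A's whole body as a function of the three find results (what unfolding the literal foldl leaves).
def mixA (x y z : Int) : Int :=
  let l3 : List Int :=
    (if x ≠ -1 then [x] else []) ++ (if y ≠ -1 then [y] else []) ++ (if z ≠ -1 then [z] else [])
  if l3 ≠ [] then (PySem.List.min? l3 id).getD (-1) else -1

lemma find_start_block_eq_mixA (code : String) :
    find_start_block code =
      mixA (PySem.Chars.find code.toList ['{','%'])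
           (PySem.Chars.find code.toList ['{','{'])
           (PySem.Chars.find code.toList ['{','#']) := by
  simp only [find_start_block, mixA, PySem.Str.find, List.foldl]
  split_ifs <;> simp_all

lemma go_ge : ∀ (l : List Char) (sub : List Char) (k : Nat),
    PySem.Chars.find.go sub l k = -1 ∨ (k : Int) ≤ PySem.Chars.find.go sub l k := by
  intro l
  induction l with
  | nil =>
      intro sub k
      rw [PySem.Chars.find.go]
      split_ifs
      · right; exact le_refl _
      · left; rfl
  | cons h t ih =>
      intro sub k
      rw [PySem.Chars.find.go]
      split_ifs with hp
      · right; exact le_refl _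
      · rcases ih sub (k + 1) with h1 | h1
        · left; exact h1
        · right; omega

-- the value of A's body when one input equals the minimum m and every other is -1 or ≥ m
lemma mixA_eq (x y z m : Int) (h0 : 0 ≤ m)
    (hx : x = -1 ∨ m ≤ x) (hy : y = -1 ∨ m ≤ y) (hz : z = -1 ∨ m ≤ z)
    (hm : x = m ∨ y = m ∨ z = m) : mixA x y z = m := by
  unfold mixA
  have hmem : m ∈ (if x ≠ -1 then [x] else []) ++ (if y ≠ -1 then [y] else []) ++ (if z ≠ -1 then [z] else []) := by
    simp only [List.mem_append, List.mem_ite_nil_right, List.mem_singleton]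
    rcases hm with hm | hm | hm <;> subst hm
    · exact Or.inl (Or.inl ⟨by omega, rfl⟩)
    · exact Or.inl (Or.inr ⟨by omega, rfl⟩)
    · exact Or.inr ⟨by omega, rfl⟩
  have hne := List.ne_nil_of_mem hmem
  rw [if_pos hne]
  obtain ⟨w, hw⟩ : ∃ w, PySem.List.min? ((if x ≠ -1 then [x] else []) ++ (if y ≠ -1 then [y] else []) ++ (if z ≠ -1 then [z] else [])) id = some w := by
    cases h : PySem.List.min? ((if x ≠ -1 then [x] else []) ++ (if y ≠ -1 then [y] else []) ++ (if z ≠ -1 then [z] else [])) id with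
    | none => exact absurd ((PySem.List.min?_eq_none_iff _ _).mp h) hne
    | some w => exact ⟨w, rfl⟩
  rw [hw]
  have hwm : w ∈ _ := PySem.List.min?_mem hw
  have hle : (id w : Int) ≤ id m := PySem.List.min?_isMin hw m hmem
  have hge : m ≤ w := by
    simp only [List.mem_append, List.mem_ite_nil_right, List.mem_singleton] at hwm
    rcases hwm with (⟨_, rfl⟩ | ⟨_, rfl⟩) | ⟨_, rfl⟩ <;> omega
  simp only [id_eq] at hle
  simp only [Option.getD_some]
  omega

lemma mix_main : ∀ (l : List Char) (k : Nat),
    mixA (PySem.Chars.find.go ['{','%'] l k)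
         (PySem.Chars.find.go ['{','{'] l k)
         (PySem.Chars.find.go ['{','#'] l k) = scanAlt l k := by
  intro l
  induction l with
  | nil =>
      intro k
      rw [PySem.Chars.find.go, PySem.Chars.find.go, PySem.Chars.find.go]
      simp [scanAlt, mixA]
  | cons c t ih =>
      intro k
      match t with
      | [] =>
          rw [PySem.Chars.find.go, PySem.Chars.find.go, PySem.Chars.find.go]
          rw [PySem.Chars.find.go, PySem.Chars.find.go, PySem.Chars.find.go]
          simp [scanAlt, mixA, List.isPrefixOf]
      | d :: rest =>
          by_cases hm : c = '{' ∧ (d = '%' ∨ d = '{' ∨ d = '#')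
          · obtain ⟨hc, hd⟩ := hm
            subst hc
            rcases hd with hd | hd | hd <;> subst hd
            · have hs : scanAlt ('{' :: '%' :: rest) k = (k : Int) := by
                rw [scanAlt]; simp
              have g1 : PySem.Chars.find.go ['{','%'] ('{' :: '%' :: rest) k = (k : Int) := by
                rw [PySem.Chars.find.go]; simp [List.isPrefixOf]
              have g2 : PySem.Chars.find.go ['{','{'] ('{' :: '%' :: rest) k = PySem.Chars.find.go ['{','{'] ('%' :: rest) (k + 1) := by
                rw [PySem.Chars.find.go]; simp [List.isPrefixOf]
              have g3 : PySem.Chars.find.go ['{','#'] ('{' :: '%' :: rest) k = PySem.Chars.find.go ['{','#'] ('%' :: rest) (k + 1) := by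
                rw [PySem.Chars.find.go]; simp [List.isPrefixOf]
              rw [hs, g1, g2, g3]
              refine mixA_eq _ _ _ (k : Int) (by omega) (Or.inr (le_refl _)) (by rcases go_ge ('%' :: rest) ['{','{'] (k + 1) with h | h; exact Or.inl h; exact Or.inr (by omega)) (by rcases go_ge ('%' :: rest) ['{','#'] (k + 1) with h | h; exact Or.inl h; exact Or.inr (by omega)) (by exact Or.inl rfl)
            · have hs : scanAlt ('{' :: '{' :: rest) k = (k : Int) := by
                rw [scanAlt]; simp
              have g1 : PySem.Chars.find.go ['{','%'] ('{' :: '{' :: rest) k = PySem.Chars.find.go ['{','%'] ('{' :: rest) (k + 1) := by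
                rw [PySem.Chars.find.go]; simp [List.isPrefixOf]
              have g2 : PySem.Chars.find.go ['{','{'] ('{' :: '{' :: rest) k = (k : Int) := by
                rw [PySem.Chars.find.go]; simp [List.isPrefixOf]
              have g3 : PySem.Chars.find.go ['{','#'] ('{' :: '{' :: rest) k = PySem.Chars.find.go ['{','#'] ('{' :: rest) (k + 1) := by
                rw [PySem.Chars.find.go]; simp [List.isPrefixOf]
              rw [hs, g1, g2, g3]
              refine mixA_eq _ _ _ (k : Int) (by omega) (by rcases go_ge ('{' :: rest) ['{','%'] (k + 1) with h | h; exact Or.inl h; exact Or.inr (by omega)) (Or.inr (le_refl _)) (by rcases go_ge ('{' :: rest) ['{','#'] (k + 1) with h | h; exact Or.inl h; exact Or.inr (by omega)) (by exact Or.inr (Or.inl rfl))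
            · have hs : scanAlt ('{' :: '#' :: rest) k = (k : Int) := by
                rw [scanAlt]; simp
              have g1 : PySem.Chars.find.go ['{','%'] ('{' :: '#' :: rest) k = PySem.Chars.find.go ['{','%'] ('#' :: rest) (k + 1) := by
                rw [PySem.Chars.find.go]; simp [List.isPrefixOf]
              have g2 : PySem.Chars.find.go ['{','{'] ('{' :: '#' :: rest) k = PySem.Chars.find.go ['{','{'] ('#' :: rest) (k + 1) := by
                rw [PySem.Chars.find.go]; simp [List.isPrefixOf]
              have g3 : PySem.Chars.find.go ['{','#'] ('{' :: '#' :: rest) k = (k : Int) := by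
                rw [PySem.Chars.find.go]; simp [List.isPrefixOf]
              rw [hs, g1, g2, g3]
              refine mixA_eq _ _ _ (k : Int) (by omega) (by rcases go_ge ('#' :: rest) ['{','%'] (k + 1) with h | h; exact Or.inl h; exact Or.inr (by omega)) (by rcases go_ge ('#' :: rest) ['{','{'] (k + 1) with h | h; exact Or.inl h; exact Or.inr (by omega)) (Or.inr (le_refl _)) (by exact Or.inr (Or.inr rfl))

          · have hs : scanAlt (c :: d :: rest) k = scanAlt (d :: rest) (k + 1) := by
              rw [scanAlt]; simp [hm]
            have hp : ∀ e : Char, e = '%' ∨ e = '{' ∨ e = '#' →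
                (['{', e].isPrefixOf (c :: d :: rest)) = false := by
              intro e he
              have hnot : ¬(c = '{' ∧ d = e) :=
                fun ⟨h1, h2⟩ => hm ⟨h1, by rcases he with rfl | rfl | rfl <;> simp [h2]⟩
              simp only [List.isPrefixOf, Bool.and_eq_false_iff]
              by_cases hc : c = '{'
              · refine Or.inr (Or.inl ?_)
                simp only [beq_eq_false_iff_ne, ne_eq]
                exact fun hh => hnot ⟨hc, hh.symm⟩
              · exact Or.inl (by simp only [beq_eq_false_iff_ne, ne_eq]; exact fun hh => hc hh.symm)
            have g1 : PySem.Chars.find.go ['{','%'] (c :: d :: rest) k = PySem.Chars.find.go ['{','%'] (d :: rest) (k + 1) := by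
              rw [PySem.Chars.find.go]; simp [hp '%' (Or.inl rfl)]
            have g2 : PySem.Chars.find.go ['{','{'] (c :: d :: rest) k = PySem.Chars.find.go ['{','{'] (d :: rest) (k + 1) := by
              rw [PySem.Chars.find.go]; simp [hp '{' (Or.inr (Or.inl rfl))]
            have g3 : PySem.Chars.find.go ['{','#'] (c :: d :: rest) k = PySem.Chars.find.go ['{','#'] (d :: rest) (k + 1) := by
              rw [PySem.Chars.find.go]; simp [hp '#' (Or.inr (Or.inr rfl))]
            rw [g1, g2, g3, hs, ih (k + 1)]

-- ===== VERDICT (by name: the statement is the Claim_ definition above) =====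
theorem find_start_block_spec : Claim_equal_find_start_block := by
  intro code _
  unfold Spec_find_start_block find_start_block_alt
  rw [find_start_block_eq_mixA]
  exact mix_main code.toList 0
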